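-- pv_equiv track=rewrite | github.com/rf-iasys/OEIS | OEIS_A248234_A183861.py | compute_elements
-- ===== SOURCE A (Python) =====
-- def compute_elements(n_end: int) -> list[int]:
--     """
--     Compute elements using formula from OEIS A193218
--     """
--     elements = []
--     for a in range(0, n_end):
--         for b in range(a + 1, n_end - a + 1):
--             x = abs(a**2 - b**2) * (a**3 + b**3)
--             y = x * (b - a)
--             if y != 0 and y == x:
--                 elements.append(y)
--     # Sort and remove duplicates if any
--     return sorted(list(set(elements)))
-- ===== SOURCE B (Python) =====
-- def compute_elements(n_end: int) -> list[int]: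
--     """
--     The filter y != 0 and y == x (with y = x*(b-a)) only passes for b = a + 1
--     (and x != 0), and b = a+1 lies in range(a+1, n_end-a+1) iff 2*a+1 <= n_end;
--     there x = (2*a+1)*(a**3+(a+1)**3) is positive and strictly increasing in a,
--     so the collected values are already distinct and sorted.
--     """
--     return [(2 * a + 1) * (a ** 3 + (a + 1) ** 3) for a in range((n_end + 1) // 2)]
-- ===== Notes on version B (the rewrite author's own statement) =====
-- stated objective: faster
-- what changed: B replaces the O(n^2) nested loops plus set+sort with a single closed-form loop: the filter y==x!=0 forces b=a+1, so B directly emits (2a+1)*(a^3+(a+1)^3) for a in range((n_end+1)//2), which is already sorted and duplicate-free.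
import Mathlib
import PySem

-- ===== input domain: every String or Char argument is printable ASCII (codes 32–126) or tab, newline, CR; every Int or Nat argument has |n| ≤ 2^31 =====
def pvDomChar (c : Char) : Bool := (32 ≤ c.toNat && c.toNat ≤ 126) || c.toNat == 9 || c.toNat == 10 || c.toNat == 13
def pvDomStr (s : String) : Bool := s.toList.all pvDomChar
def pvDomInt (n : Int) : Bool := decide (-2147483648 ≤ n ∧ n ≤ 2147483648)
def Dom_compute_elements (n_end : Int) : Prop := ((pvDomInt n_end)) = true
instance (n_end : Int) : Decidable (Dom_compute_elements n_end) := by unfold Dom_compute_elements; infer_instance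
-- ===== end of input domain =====

-- B replaces A's O(n^2) nested loops + set + sort with one direct loop over a
-- (the filter forces b = a+1), emitting values already sorted and distinct.

-- ===== PORT A =====
def compute_elements (n_end : Int) : List Int :=
  let elements : List Int :=
    (PySem.List.pyRange 0 n_end 1).foldl (fun elements a =>
      (PySem.List.pyRange (a + 1) (n_end - a + 1) 1).foldl (fun elements b =>
        let x := |a ^ 2 - b ^ 2| * (a ^ 3 + b ^ 3)
        let y := x * (b - a)
        if y ≠ 0 ∧ y = x then elements ++ [y] else elements) elements) []
  PySem.List.sorted (PySem.Set.ofList elements) (fun z => z) false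

-- ===== PORT B =====
def compute_elements_alt (n_end : Int) : List Int :=
  (PySem.List.pyRange 0 (PySem.Int.floordiv (n_end + 1) 2) 1).map
    (fun a => (2 * a + 1) * (a ^ 3 + (a + 1) ^ 3))

-- ===== PRECONDITION & SPEC =====
def Spec_compute_elements (n_end : Int) (out : List Int) : Prop := out = compute_elements_alt n_end
instance (n_end : Int) (out : List Int) : Decidable (Spec_compute_elements n_end out) := by unfold Spec_compute_elements; infer_instance

-- ===== CLAIM (what is proved, stated in full; the proofs are below) =====
def Claim_equal_compute_elements : Prop := ∀ (n_end : Int), Dom_compute_elements n_end → Spec_compute_elements n_end (compute_elements n_end)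

-- ===== LEMMAS AND PROOFS =====

-- the value B emits for a given a
def pvG (a : Int) : Int := (2 * a + 1) * (a ^ 3 + (a + 1) ^ 3)

-- generic: a foldl that conditionally appends is append of the filtered map
theorem pv_foldl_ite (P : Int → Prop) [DecidablePred P] (f : Int → Int)
    (l : List Int) (acc : List Int) :
    l.foldl (fun acc b => if P b then acc ++ [f b] else acc) acc
      = acc ++ (l.filter (fun b => decide (P b))).map f := by
  induction l generalizing acc with
  | nil => simp
  | cons b t ih =>
    by_cases h : P b <;> simp [h, ih]

theorem pv_flatMap_singleton (g : Int → List Int) (f : Int → Int) (l : List Int)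
    (h : ∀ a ∈ l, g a = [f a]) : l.flatMap g = l.map f := by
  induction l with
  | nil => simp
  | cons a t ih =>
    simp only [List.flatMap_cons, List.map_cons, h a (by simp)]
    rw [ih (fun x hx => h x (by simp [hx]))]
    simp

theorem pv_flatMap_nil (g : Int → List Int) (l : List Int)
    (h : ∀ a ∈ l, g a = []) : l.flatMap g = [] := by
  induction l with
  | nil => simp
  | cons a t ih =>
    simp only [List.flatMap_cons, h a (by simp)]
    exact ih (fun x hx => h x (by simp [hx]))

-- the filter condition holds exactly at b = a + 1 (for 0 ≤ a < b)
theorem pv_cond_iff (a b : Int) (ha : 0 ≤ a) (hab : a < b) :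
    ((|a ^ 2 - b ^ 2| * (a ^ 3 + b ^ 3)) * (b - a) ≠ 0 ∧
     (|a ^ 2 - b ^ 2| * (a ^ 3 + b ^ 3)) * (b - a) = |a ^ 2 - b ^ 2| * (a ^ 3 + b ^ 3))
      ↔ b = a + 1 := by
  have hx : 0 < |a ^ 2 - b ^ 2| * (a ^ 3 + b ^ 3) := by
    have h1 : a ^ 2 < b ^ 2 := by nlinarith
    have h2 : |a ^ 2 - b ^ 2| = b ^ 2 - a ^ 2 := by
      rw [abs_of_neg (by omega)]; ring
    have h3 : 0 < a ^ 3 + b ^ 3 := by nlinarith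
    rw [h2]; exact mul_pos (by omega) h3
  constructor
  · rintro ⟨_, heq⟩
    by_contra hne
    have hb2 : 2 ≤ b - a := by omega
    nlinarith
  · rintro rfl
    constructor
    · simp only [add_sub_cancel_left, mul_one]; omega
    · simp only [add_sub_cancel_left, mul_one]

-- inner loop: yields exactly [pvG a] when 2a+1 ≤ n_end, else nothing
theorem pv_inner (n_end a : Int) (ha : 0 ≤ a) (acc : List Int) :
    (PySem.List.pyRange (a + 1) (n_end - a + 1) 1).foldl (fun elements b =>
        if (|a ^ 2 - b ^ 2| * (a ^ 3 + b ^ 3)) * (b - a) ≠ 0 ∧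
           (|a ^ 2 - b ^ 2| * (a ^ 3 + b ^ 3)) * (b - a) = |a ^ 2 - b ^ 2| * (a ^ 3 + b ^ 3)
        then elements ++ [(|a ^ 2 - b ^ 2| * (a ^ 3 + b ^ 3)) * (b - a)] else elements) acc
      = acc ++ (if 2 * a + 1 ≤ n_end then [pvG a] else []) := by
  rw [pv_foldl_ite
      (fun b => (|a ^ 2 - b ^ 2| * (a ^ 3 + b ^ 3)) * (b - a) ≠ 0 ∧
        (|a ^ 2 - b ^ 2| * (a ^ 3 + b ^ 3)) * (b - a) = |a ^ 2 - b ^ 2| * (a ^ 3 + b ^ 3))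
      (fun b => (|a ^ 2 - b ^ 2| * (a ^ 3 + b ^ 3)) * (b - a))]
  congr 1
  by_cases h : 2 * a + 1 ≤ n_end
  · have hlt : a + 1 < n_end - a + 1 := by omega
    rw [PySem.List.pyRange_one_cons hlt]
    have hhead : (decide ((|a ^ 2 - (a+1) ^ 2| * (a ^ 3 + (a+1) ^ 3)) * ((a+1) - a) ≠ 0 ∧
        (|a ^ 2 - (a+1) ^ 2| * (a ^ 3 + (a+1) ^ 3)) * ((a+1) - a) = |a ^ 2 - (a+1) ^ 2| * (a ^ 3 + (a+1) ^ 3))) = true := by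
      simp only [decide_eq_true_eq]
      exact (pv_cond_iff a (a+1) ha (by omega)).mpr rfl
    rw [List.filter_cons, if_pos hhead]
    have htail : (PySem.List.pyRange (a + 1 + 1) (n_end - a + 1) 1).filter
        (fun b => decide ((|a ^ 2 - b ^ 2| * (a ^ 3 + b ^ 3)) * (b - a) ≠ 0 ∧
          (|a ^ 2 - b ^ 2| * (a ^ 3 + b ^ 3)) * (b - a) = |a ^ 2 - b ^ 2| * (a ^ 3 + b ^ 3))) = [] := by
      rw [List.filter_eq_nil_iff]
      intro b hb
      have hmem := (PySem.List.mem_pyRange_one).mp hb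
      simp only [decide_eq_true_eq]
      intro hc
      have := (pv_cond_iff a b ha (by omega)).mp hc
      omega
    rw [htail]
    have hval : |a ^ 2 - (a+1) ^ 2| = 2 * a + 1 := by
      rw [abs_of_neg (by nlinarith)]; ring
    rw [if_pos h]
    simp only [List.map_cons, List.map_nil, hval, pvG]
    norm_num
  · rw [PySem.List.pyRange_one_eq_nil (by omega), if_neg h]
    simp

-- pvG is strictly monotone on nonnegative arguments
theorem pvG_strictMono (a b : Int) (ha : 0 ≤ a) (hab : a < b) : pvG a < pvG b := by
  unfold pvG
  have h1 : a ^ 3 < b ^ 3 := pow_lt_pow_left₀ hab ha (by norm_num)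
  have h2 : (a + 1) ^ 3 < (b + 1) ^ 3 := pow_lt_pow_left₀ (by omega) (by omega) (by norm_num)
  have h3 : (0:Int) < a ^ 3 + (a + 1) ^ 3 := by positivity
  exact mul_lt_mul'' (by omega) (by omega) (by omega) (by positivity)

-- Set.ofList of a Nodup list is the list itself
theorem pv_foldl_add (L acc : List Int) (h : (acc ++ L).Nodup) :
    L.foldl PySem.Set.add acc = acc ++ L := by
  induction L generalizing acc with
  | nil => simp
  | cons x t ih =>
    have hx : x ∉ acc := by
      intro hmem
      have hd := (List.nodup_append.mp h).2.2
      exact hd x hmem x (List.Mem.head _) rfl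
    have hadd : PySem.Set.add acc x = acc ++ [x] := by
      simp [PySem.Set.add, PySem.Set.contains, hx]
    simp only [List.foldl_cons, hadd]
    rw [ih (acc ++ [x]) (by simpa using h)]
    simp

theorem pv_ofList_nodup (L : List Int) (h : L.Nodup) : PySem.Set.ofList L = L := by
  have : PySem.Set.ofList L = L.foldl PySem.Set.add [] := PySem.Set.ofList_eq_foldl L
  rw [this, pv_foldl_add L [] (by simpa using h)]
  simp

-- elements list built by A equals B's list
theorem pv_elements (n_end : Int) :
    (PySem.List.pyRange 0 n_end 1).foldl (fun elements a =>
      (PySem.List.pyRange (a + 1) (n_end - a + 1) 1).foldl (fun elements b =>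
        let x := |a ^ 2 - b ^ 2| * (a ^ 3 + b ^ 3)
        let y := x * (b - a)
        if y ≠ 0 ∧ y = x then elements ++ [y] else elements) elements) []
      = compute_elements_alt n_end := by
  have hcongr : (PySem.List.pyRange 0 n_end 1).foldl (fun elements a =>
      (PySem.List.pyRange (a + 1) (n_end - a + 1) 1).foldl (fun elements b =>
        let x := |a ^ 2 - b ^ 2| * (a ^ 3 + b ^ 3)
        let y := x * (b - a)
        if y ≠ 0 ∧ y = x then elements ++ [y] else elements) elements) []
      = (PySem.List.pyRange 0 n_end 1).foldl (fun elements a =>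
          elements ++ (if 2 * a + 1 ≤ n_end then [pvG a] else [])) [] := by
    apply PySem.List.foldl_congr_mem
    intro acc a hmem
    have ha : 0 ≤ a := ((PySem.List.mem_pyRange_one).mp hmem).1
    simpa using pv_inner n_end a ha acc
  rw [hcongr, PySem.List.foldl_append_eq_flatMap]
  simp only [List.nil_append]
  set k : Int := PySem.Int.floordiv (n_end + 1) 2 with hk
  have hk2 : k = Int.fdiv (n_end + 1) 2 := rfl
  have hkediv : k = (n_end + 1) / 2 := by
    rw [hk2, Int.fdiv_eq_ediv]; simp
  by_cases hpos : 1 ≤ n_end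
  · have hk0 : 0 ≤ k := by omega
    have hkn : k ≤ n_end := by omega
    rw [PySem.List.pyRange_one_append 0 k n_end hk0 hkn, List.flatMap_append]
    have h1 : (PySem.List.pyRange 0 k 1).flatMap
        (fun a => if 2 * a + 1 ≤ n_end then [pvG a] else []) =
        (PySem.List.pyRange 0 k 1).map pvG := by
      apply pv_flatMap_singleton
      intro a hmem
      have := (PySem.List.mem_pyRange_one).mp hmem
      rw [if_pos (by omega)]
    have h2 : (PySem.List.pyRange k n_end 1).flatMap
        (fun a => if 2 * a + 1 ≤ n_end then [pvG a] else []) = [] := by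
      apply pv_flatMap_nil
      intro a hmem
      have := (PySem.List.mem_pyRange_one).mp hmem
      rw [if_neg (by omega)]
    rw [h1, h2, List.append_nil]
    rfl
  · rw [PySem.List.pyRange_one_eq_nil (by omega)]
    unfold compute_elements_alt
    rw [← hk, PySem.List.pyRange_one_eq_nil (by omega)]
    simp

theorem pv_alt_pairwise (n_end : Int) :
    (compute_elements_alt n_end).Pairwise (· < ·) := by
  unfold compute_elements_alt
  have hp : (PySem.List.pyRange 0 (PySem.Int.floordiv (n_end + 1) 2) 1).Pairwise (· < ·) :=
    PySem.List.pairwise_lt_pyRange_one 0 _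
  have hp' := hp.imp_of_mem (S := fun a b =>
      (2 * a + 1) * (a ^ 3 + (a + 1) ^ 3) < (2 * b + 1) * (b ^ 3 + (b + 1) ^ 3))
    (fun {a b} hma hmb hab => by
      have ha : 0 ≤ a := ((PySem.List.mem_pyRange_one).mp hma).1
      exact pvG_strictMono a b ha hab)
  exact List.pairwise_map.mpr hp'

-- ===== VERDICT (by name: the statement is the Claim_ definition above) =====
theorem compute_elements_spec : Claim_equal_compute_elements := by
  intro n_end _
  unfold Spec_compute_elements compute_elements
  simp only
  rw [pv_elements n_end]
  have hpw := pv_alt_pairwise n_end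
  rw [pv_ofList_nodup _ (hpw.imp (fun h => ne_of_lt h))]
  apply PySem.List.sorted_eq_of_perm_of_pairwise_lt
  · exact List.Perm.refl _
  · simpa using hpw
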